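-- pv_equiv track=rewrite | github.com/mathiashatlestad/aoc2025 | day07/solve.py | part2
-- ===== SOURCE A (Python) =====
-- from collections import defaultdict
--
-- def part2(data: list[list[str]]) -> int:
--     rows = len(data)
--     cols = len(data[0])
--
--     start_col = data[0].index('S')
--
--     current_row_paths = defaultdict(int)
--     current_row_paths[start_col] = 1
--
--     total_timelines = 0
--
--     for row in range(1, rows):
--         next_row_paths = defaultdict(int)
--
--         for col, count in current_row_paths.items():
--
--             if col < 0 or col >= cols: # Terminating outside the map!
--                 total_timelines += count
--                 continue
--
--             cell = data[row][col]
--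
--             if cell == '^':
--                 next_row_paths[col - 1] += count
--                 next_row_paths[col + 1] += count
--             else:
--                 next_row_paths[col] += count
--
--         current_row_paths = next_row_paths
--
--     ## Count for the last row
--     for col, count in current_row_paths.items():
--         total_timelines += count
--
--     return total_timelines
-- ===== SOURCE B (Python) =====
-- def part2(data: list[list[str]]) -> int:
--     # Backward dense DP: w[c] = number of timelines starting at column c of the
--     # current row; off-map columns always contribute 1, so we fold rows bottom-up.
--     cols = len(data[0])
--     start_col = data[0].index('S')
--     w = [1] * cols
--     for row in reversed(data[1:]):
--         def val(c):
--             return w[c] if 0 <= c < cols else 1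
--         w = [val(c - 1) + val(c + 1) if row[c] == '^' else w[c] for c in range(cols)]
--     return w[start_col]
-- ===== Notes on version B (the rewrite author's own statement) =====
-- stated objective: alternative
-- what changed: A pushes a sparse dict of path counts forward row by row and accumulates counts that leave the map; B folds the grid backward, maintaining one dense per-column array of timeline counts for the row below, and reads off the start column.
-- outside the precondition, e.g. on part2([['S', '.'], ['.']]): A returns 1, B raises IndexError
import Mathlib
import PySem

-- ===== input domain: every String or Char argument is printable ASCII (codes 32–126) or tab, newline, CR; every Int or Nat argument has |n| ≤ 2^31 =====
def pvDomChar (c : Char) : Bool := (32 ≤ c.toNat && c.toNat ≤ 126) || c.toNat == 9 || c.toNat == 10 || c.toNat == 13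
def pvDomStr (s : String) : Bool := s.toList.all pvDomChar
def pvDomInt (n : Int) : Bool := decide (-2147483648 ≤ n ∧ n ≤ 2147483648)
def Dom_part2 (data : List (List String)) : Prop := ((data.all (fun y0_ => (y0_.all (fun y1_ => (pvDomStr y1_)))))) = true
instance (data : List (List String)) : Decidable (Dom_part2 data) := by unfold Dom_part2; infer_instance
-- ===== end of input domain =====

-- B replaces A's forward sparse-dict propagation (with an off-map accumulator) by a
-- backward dense per-row DP array folded from the last row up; objective: alternative.


-- ===== PORT A =====
-- A-side helpers: the body of A's inner loop (one (col, count) item) and its outer row loop.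
def partAInner (data : List (List String)) (cols row : Int)
    (st : PySem.Dict Int Int × Int) (ck : Int × Int) : PySem.Dict Int Int × Int :=
  if ck.1 < 0 ∨ cols ≤ ck.1 then (st.1, st.2 + ck.2)          -- terminating outside the map
  else
    let cell := PySem.List.pyGetD (PySem.List.pyGetD data row []) ck.1 ""   -- data[row][col]
    if cell == "^" then
      ((st.1.modify (ck.1 - 1) 0 (· + ck.2)).modify (ck.1 + 1) 0 (· + ck.2), st.2)
    else (st.1.modify ck.1 0 (· + ck.2), st.2)

def partAOuter (data : List (List String)) (cols : Int)
    (st : PySem.Dict Int Int × Int) (row : Int) : PySem.Dict Int Int × Int :=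
  st.1.items.foldl (partAInner data cols row) (PySem.Dict.empty, st.2)

def part2 (data : List (List String)) : Int :=
  let rows : Int := data.length
  let row0 : List String := PySem.List.pyGetD data 0 []        -- data[0] (Pre_: data ≠ [])
  let cols : Int := row0.length
  let startCol : Int := ((PySem.List.index? row0 "S").getD 0 : Nat)  -- Pre_: "S" ∈ data[0]
  let st := (PySem.List.pyRange 1 rows).foldl (partAOuter data cols)
              (PySem.Dict.empty.insert startCol 1, 0)
  st.1.items.foldl (fun t ck => t + ck.2) st.2                 -- count for the last row

-- ===== PORT B =====
-- B-side helper: one backward DP step (the list comprehension of Source B).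
def partBStep (cols : Int) (w : List Int) (row : List String) : List Int :=
  (PySem.List.pyRange 0 cols).map (fun c =>
    if PySem.List.pyGetD row c "" == "^" then
      (if 0 ≤ c - 1 ∧ c - 1 < cols then PySem.List.pyGetD w (c - 1) 0 else 1) +
      (if 0 ≤ c + 1 ∧ c + 1 < cols then PySem.List.pyGetD w (c + 1) 0 else 1)
    else PySem.List.pyGetD w c 0)

def part2_alt (data : List (List String)) : Int :=
  let row0 : List String := PySem.List.pyGetD data 0 []
  let cols : Int := row0.length
  let startCol : Int := ((PySem.List.index? row0 "S").getD 0 : Nat)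
  let w := ((PySem.List.slice data (some 1) none).reverse).foldl (partBStep cols)
             (List.replicate cols.toNat 1)                      -- reversed(data[1:]), w = [1]*cols
  PySem.List.pyGetD w startCol 0

-- ===== PRECONDITION & SPEC =====
-- Pre_ excludes inputs where A raises (empty data, no 'S' in row 0, IndexError on a reachable
-- too-short row); requiring EVERY row at least as long as row 0 also excludes some ragged grids
-- whose short cells A never reaches (A returns there, B raises IndexError).
def Pre_part2 (data : List (List String)) : Prop :=
  data ≠ [] ∧ "S" ∈ data.headD [] ∧ ∀ r ∈ data, (data.headD []).length ≤ r.length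
instance (data : List (List String)) : Decidable (Pre_part2 data) := by unfold Pre_part2; infer_instance

def pvWitness_part2 : List (List String) := [["S", "."], ["^", "."], [".", "."]]

def Spec_part2 (data : List (List String)) (out : Int) : Prop := out = part2_alt data
instance (data : List (List String)) (out : Int) : Decidable (Spec_part2 data out) := by unfold Spec_part2; infer_instance

-- ===== CLAIM (what is proved, stated in full; the proofs are below) =====
def Claim_equal_part2 : Prop := ∀ (data : List (List String)), Dom_part2 data → Pre_part2 data → Spec_part2 data (part2 data)

-- ===== LEMMAS AND PROOFS =====

-- tl cols grid c = number of timelines of a particle at column c with `grid` the rows below it.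
def tl (cols : Int) : List (List String) → Int → Int
  | [], _ => 1
  | row :: rest, c =>
    if c < 0 ∨ cols ≤ c then 1
    else if PySem.List.pyGetD row c "" == "^" then tl cols rest (c - 1) + tl cols rest (c + 1)
    else tl cols rest c

-- weighted sum of dict items: Σ count * g col
def Swt (l : List (Int × Int)) (g : Int → Int) : Int := (l.map (fun p => p.2 * g p.1)).sum

theorem tl_off (cols : Int) (g : List (List String)) (c : Int) (h : c < 0 ∨ cols ≤ c) :
    tl cols g c = 1 := by
  cases g <;> simp [tl, h]

theorem swt_replace (g : Int → Int) (c old w : Int) :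
    ∀ (l : List (Int × Int)), (l.map Prod.fst).Nodup → (c, old) ∈ l →
    Swt (l.map (fun p => if p.1 == c then (c, w) else p)) g = Swt l g - old * g c + w * g c := by
  intro l
  induction l with
  | nil => simp
  | cons p l ih =>
    obtain ⟨a, b⟩ := p
    intro hnd hmem
    simp only [List.map_cons, List.nodup_cons] at hnd
    by_cases hpc : a = c
    · subst hpc
      have hb : old = b := by
        rcases List.mem_cons.mp hmem with h | h
        · exact (Prod.ext_iff.mp h).2
        · exact absurd (List.mem_map_of_mem (f := Prod.fst) h) hnd.1
      subst hb
      have hmap : l.map (fun p => if p.1 == a then (a, w) else p) = l := by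
        conv_rhs => rw [← List.map_id l]
        apply List.map_congr_left
        intro q hq
        have : q.1 ≠ a := fun hqa => hnd.1 (hqa ▸ List.mem_map_of_mem (f := Prod.fst) hq)
        simp [this]
      simp only [List.map_cons, beq_self_eq_true, if_pos, hmap]
      simp only [Swt, List.map_cons, List.sum_cons]
      ring
    · have hmem' : (c, old) ∈ l := by
        rcases List.mem_cons.mp hmem with h | h
        · exact absurd (congrArg Prod.fst h).symm hpc
        · exact h
      have hih := ih hnd.2 hmem'
      simp only [List.map_cons, if_neg (by simp [hpc] : ¬ ((a, b).1 == c) = true)]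
      simp only [Swt, List.map_cons, List.sum_cons] at hih ⊢
      omega

theorem keys_nodup_insert (d : PySem.Dict Int Int) (k v : Int) (h : d.keys.Nodup) :
    (d.insert k v).keys.Nodup := by
  by_cases hc : d.contains k
  · have hkeys : (d.insert k v).keys = d.keys := by
      simp only [PySem.Dict.keys, PySem.Dict.items_insert, hc, if_pos, List.map_map]
      apply List.map_congr_left
      intro p _
      by_cases hpk : p.1 = k <;> simp [Function.comp, hpk]
    rw [hkeys]; exact h
  · have hkeys : (d.insert k v).keys = d.keys ++ [k] := by
      simp only [PySem.Dict.keys, PySem.Dict.items_insert_of_not_contains d v (by simpa using hc)]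
      simp
    rw [hkeys]
    refine List.Nodup.append h (List.nodup_singleton k) ?_
    intro a ha hb
    simp only [List.mem_singleton] at hb
    subst hb
    exact hc ((PySem.Dict.contains_iff_mem_keys d a).mpr ha)

theorem swt_modify (g : Int → Int) (d : PySem.Dict Int Int) (hnd : d.keys.Nodup) (c v : Int) :
    Swt ((d.modify c 0 (· + v)).items) g = Swt d.items g + v * g c := by
  have hmod : d.modify c 0 (· + v) = d.insert c (d.getD c 0 + v) := rfl
  rw [hmod]
  by_cases hc : d.contains c
  · have hget : d.get? c = some (d.getD c 0) := by
      have hsome : (d.get? c).isSome = true := by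
        rw [← PySem.Dict.contains_eq_isSome_get? d c]; exact hc
      rcases Option.isSome_iff_exists.mp hsome with ⟨y, hy⟩
      have hgd : d.getD c 0 = (d.get? c).getD 0 := rfl
      rw [hgd, hy]; rfl
    have hmem := PySem.Dict.mem_items_of_get?_eq_some d hget
    rw [PySem.Dict.items_insert]
    simp only [hc, if_pos]
    rw [swt_replace g c (d.getD c 0) (d.getD c 0 + v) d.items hnd hmem]
    ring
  · have h0 : d.getD c 0 = 0 := by
      have hn : d.get? c = none := (PySem.Dict.get?_eq_none_iff_contains d c).mpr (by simpa using hc)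
      show (d.get? c).getD 0 = 0
      rw [hn]; rfl
    rw [PySem.Dict.items_insert_of_not_contains d _ (by simpa using hc), h0]
    simp [Swt]

theorem keys_nodup_modify (d : PySem.Dict Int Int) (c v : Int) (h : d.keys.Nodup) :
    (d.modify c 0 (· + v)).keys.Nodup := by
  have hmod : d.modify c 0 (· + v) = d.insert c (d.getD c 0 + v) := rfl
  rw [hmod]; exact keys_nodup_insert _ _ _ h

-- one inner pass (over the items of the current row's dict)
theorem innerA (data : List (List String)) (cols : Int) (r : Nat) (row : List String)
    (rest : List (List String)) (hrow : PySem.List.pyGetD data (r : Int) [] = row) :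
    ∀ (items : List (Int × Int)) (nd : PySem.Dict Int Int) (t : Int), nd.keys.Nodup →
      (items.foldl (partAInner data cols (r : Int)) (nd, t)).1.keys.Nodup ∧
      (items.foldl (partAInner data cols (r : Int)) (nd, t)).2
        + Swt (items.foldl (partAInner data cols (r : Int)) (nd, t)).1.items (tl cols rest)
        = t + Swt nd.items (tl cols rest) + Swt items (tl cols (row :: rest)) := by
  intro items
  induction items with
  | nil => intro nd t hnd; simp [Swt, hnd]
  | cons ck items ih =>
    intro nd t hnd
    simp only [List.foldl_cons]
    by_cases hoff : ck.1 < 0 ∨ cols ≤ ck.1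
    · have hstep : partAInner data cols (r : Int) (nd, t) ck = (nd, t + ck.2) := by
        simp [partAInner, hoff]
      rw [hstep]
      rcases ih nd (t + ck.2) hnd with ⟨h1, h2⟩
      refine ⟨h1, ?_⟩
      rw [h2]
      simp only [Swt, List.map_cons, List.sum_cons]
      rw [tl_off cols (row :: rest) ck.1 hoff]
      ring
    · push Not at hoff
      have hofftl : tl cols (row :: rest) ck.1
          = (if PySem.List.pyGetD row ck.1 "" == "^"
             then tl cols rest (ck.1 - 1) + tl cols rest (ck.1 + 1) else tl cols rest ck.1) := by
        show (if ck.1 < 0 ∨ cols ≤ ck.1 then 1 else _) = _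
        rw [if_neg (by omega)]
      by_cases hcell : PySem.List.pyGetD row ck.1 "" == "^"
      · have hstep : partAInner data cols (r : Int) (nd, t) ck
            = ((nd.modify (ck.1 - 1) 0 (· + ck.2)).modify (ck.1 + 1) 0 (· + ck.2), t) := by
          simp only [partAInner, hrow]
          rw [if_neg (by omega), if_pos hcell]
        rw [hstep]
        have hnd1 := keys_nodup_modify nd (ck.1 - 1) ck.2 hnd
        have hnd2 := keys_nodup_modify _ (ck.1 + 1) ck.2 hnd1
        rcases ih _ t hnd2 with ⟨h1, h2⟩
        refine ⟨h1, ?_⟩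
        rw [h2, swt_modify _ _ hnd1, swt_modify _ _ hnd]
        simp only [Swt, List.map_cons, List.sum_cons]
        rw [hofftl, if_pos hcell]
        ring
      · have hstep : partAInner data cols (r : Int) (nd, t) ck
            = (nd.modify ck.1 0 (· + ck.2), t) := by
          simp only [partAInner, hrow]
          rw [if_neg (by omega), if_neg hcell]
        rw [hstep]
        have hnd1 := keys_nodup_modify nd ck.1 ck.2 hnd
        rcases ih _ t hnd1 with ⟨h1, h2⟩
        refine ⟨h1, ?_⟩
        rw [h2, swt_modify _ _ hnd]
        simp only [Swt, List.map_cons, List.sum_cons]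
        rw [hofftl, if_neg hcell]
        ring

-- A's whole row loop plus its final summation equals the invariant value
theorem loopA (data : List (List String)) (cols : Int) :
    ∀ (suffix : List (List String)) (r : Nat), data.drop r = suffix →
    ∀ (d : PySem.Dict Int Int) (total : Int), d.keys.Nodup →
      ((PySem.List.pyRange (r : Int) (data.length : Int)).foldl (partAOuter data cols) (d, total)).1.items.foldl
          (fun t ck => t + ck.2)
          ((PySem.List.pyRange (r : Int) (data.length : Int)).foldl (partAOuter data cols) (d, total)).2
      = total + Swt d.items (tl cols suffix) := by
  intro suffix
  induction suffix with
  | nil =>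
    intro r hdrop d total hnd
    have hlen : data.length ≤ r := List.drop_eq_nil_iff.mp hdrop
    rw [PySem.List.pyRange_one_eq_nil (by exact_mod_cast hlen)]
    simp only [List.foldl_nil]
    rw [PySem.List.foldl_add d.items (fun ck => ck.2) total]
    have h1 : ∀ p : Int × Int, p.2 * tl cols [] p.1 = p.2 := by
      intro p; show p.2 * 1 = p.2; ring
    simp [Swt, h1]
  | cons row rest ih =>
    intro r hdrop d total hnd
    have hlt : r < data.length := by
      by_contra h
      rw [List.drop_eq_nil_iff.mpr (by omega)] at hdrop
      exact (List.cons_ne_nil row rest) hdrop.symm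
    have hrow : PySem.List.pyGetD data (r : Int) [] = row := by
      have h0 : (data.drop r)[0]? = some row := by rw [hdrop]; rfl
      rw [List.getElem?_drop, Nat.add_zero] at h0
      rw [PySem.List.pyGetD_natCast, List.getD_eq_getElem?_getD, h0]; rfl
    rw [PySem.List.pyRange_one_cons (by exact_mod_cast hlt), List.foldl_cons]
    obtain ⟨h1, h2⟩ := innerA data cols r row rest hrow d.items PySem.Dict.empty total
      (by rw [PySem.Dict.keys_empty]; exact List.nodup_nil)
    have houter : partAOuter data cols (d, total) (r : Int)
        = d.items.foldl (partAInner data cols (r : Int)) (PySem.Dict.empty, total) := rfl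
    have hdrop' : data.drop (r + 1) = rest := by
      rw [← List.tail_drop, hdrop]
      rfl
    have hcast : ((r : Int) + 1) = ((r + 1 : Nat) : Int) := by push_cast; ring
    rw [houter, hcast, ih (r + 1) hdrop' _ _ h1]
    have hemp : Swt (PySem.Dict.empty : PySem.Dict Int Int).items (tl cols rest) = 0 := rfl
    rw [hemp] at h2
    omega

-- B's fold over the reversed rows computes the dense table of tl values
theorem foldB (cols : Int) :
    ∀ (grid : List (List String)),
      grid.reverse.foldl (partBStep cols) (List.replicate cols.toNat 1)
      = (PySem.List.pyRange 0 cols).map (tl cols grid) := by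
  intro grid
  rw [List.foldl_reverse]
  induction grid with
  | nil =>
    simp only [List.foldr_nil]
    have hconst : (PySem.List.pyRange 0 cols).map (tl cols [])
        = (PySem.List.pyRange 0 cols).map (fun _ => (1 : Int)) := by
      apply List.map_congr_left; intro c _; rfl
    rw [hconst, List.map_const', PySem.List.length_pyRange_one]
    simp
  | cons row rest ih =>
    simp only [List.foldr_cons, ih]
    show partBStep cols ((PySem.List.pyRange 0 cols).map (tl cols rest)) row = _
    unfold partBStep
    apply List.map_congr_left
    intro c hc
    have hcr := (PySem.List.mem_pyRange_one).mp hc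
    have hv : ∀ c' : Int,
        (if 0 ≤ c' ∧ c' < cols
         then PySem.List.pyGetD ((PySem.List.pyRange 0 cols).map (tl cols rest)) c' 0 else 1)
        = tl cols rest c' := by
      intro c'
      by_cases h' : 0 ≤ c' ∧ c' < cols
      · rw [if_pos h', PySem.List.pyGetD_map_pyRange_of_nonneg _ _ _ _ h'.1 h'.2]
      · rw [if_neg h', tl_off cols rest c' (by omega)]
    have hr : tl cols (row :: rest) c
        = if PySem.List.pyGetD row c "" == "^" then tl cols rest (c - 1) + tl cols rest (c + 1)
          else tl cols rest c := by
      show (if c < 0 ∨ cols ≤ c then 1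
        else if PySem.List.pyGetD row c "" == "^" then tl cols rest (c - 1) + tl cols rest (c + 1)
        else tl cols rest c) = _
      rw [if_neg (by omega)]
    rw [hr]
    by_cases hcell : PySem.List.pyGetD row c "" == "^"
    · rw [if_pos hcell, if_pos hcell, hv (c - 1), hv (c + 1)]
    · rw [if_neg hcell, if_neg hcell,
        PySem.List.pyGetD_map_pyRange_of_nonneg _ _ _ _ (by omega) (by omega)]

-- ===== VERDICT (by name: the statement is the Claim_ definition above) =====
theorem part2_spec : Claim_equal_part2 := by
  unfold Claim_equal_part2
  intro data _ hpre
  obtain ⟨hne, hS, _⟩ := hpre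
  obtain ⟨r0, rest, rfl⟩ := List.exists_cons_of_ne_nil hne
  simp only [List.headD_cons] at hS
  unfold Spec_part2
  simp only [part2, part2_alt]
  have hrow0 : PySem.List.pyGetD (r0 :: rest) (0 : Int) [] = r0 := PySem.List.pyGetD_zero_cons r0 rest []
  obtain ⟨k, hk⟩ := Option.isSome_iff_exists.mp ((PySem.List.index?_isSome_iff r0 "S").mpr hS)
  obtain ⟨hklt, -, -⟩ := PySem.List.getElem_of_index?_eq_some hk
  rw [hrow0, hk]
  simp only [Option.getD_some]
  -- B's side: the dense table
  rw [PySem.List.slice_from_one, List.tail_cons, foldB (r0.length : Int) rest,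
    PySem.List.pyGetD_map_pyRange_of_nonneg _ _ _ _ (by omega) (by exact_mod_cast hklt)]
  -- A's side: the loop invariant
  have hnd0 : (PySem.Dict.empty.insert ((k : Nat) : Int) (1 : Int)).keys.Nodup := by
    apply keys_nodup_insert
    rw [PySem.Dict.keys_empty]; exact List.nodup_nil
  have hA := loopA (r0 :: rest) (r0.length : Int) rest 1 rfl
    (PySem.Dict.empty.insert ((k : Nat) : Int) (1 : Int)) 0 hnd0
  simp only [Nat.cast_one] at hA
  rw [hA]
  have hitems : (PySem.Dict.empty.insert ((k : Nat) : Int) (1 : Int)).items = [(((k : Nat) : Int), 1)] := by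
    rw [PySem.Dict.items_insert_of_not_contains _ _ (PySem.Dict.contains_empty _)]
    rfl
  rw [hitems]
  simp [Swt]
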